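-- pv_equiv track=rewrite | github.com/SleepyTurtle91/extropos | integrate_modern_reports_dashboard_parts.py | _add_part_directives
-- ===== SOURCE A (Python) =====
-- def _add_part_directives(lines):
--     part_lines = [
--         "part 'modern_reports_dashboard_operations.dart';",
--         "part 'modern_reports_dashboard_futures.dart';",
--         "part 'modern_reports_dashboard_helpers.dart';",
--         "part 'modern_reports_dashboard_medium_widgets.dart';",
--         "part 'modern_reports_dashboard_small_widgets.dart';",
--     ]
--
--     if any("part 'modern_reports_dashboard" in line for line in lines):
--         return lines
--
--     output = []
--     inserted = False
--     for line in lines: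
--         if not inserted and line.startswith('enum TimeRange'):
--             for part in part_lines:
--                 output.append(part)
--             output.append('')
--             inserted = True
--         output.append(line)
--
--     return output
-- ===== SOURCE B (Python) =====
-- def _add_part_directives(lines):
--     part_lines = [
--         "part 'modern_reports_dashboard_operations.dart';",
--         "part 'modern_reports_dashboard_futures.dart';",
--         "part 'modern_reports_dashboard_helpers.dart';",
--         "part 'modern_reports_dashboard_medium_widgets.dart';",
--         "part 'modern_reports_dashboard_small_widgets.dart';",
--     ]
--
--     if any("part 'modern_reports_dashboard" in line for line in lines):
--         return lines
--
--     idx = next((i for i, l in enumerate(lines) if l.startswith('enum TimeRange')), None)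
--     if idx is None:
--         return list(lines)
--     return lines[:idx] + part_lines + [''] + lines[idx:]
-- ===== Notes on version B (the rewrite author's own statement) =====
-- stated objective: simpler
-- what changed: Replaces the flag-driven append loop with a single index search (first line starting with 'enum TimeRange') and a slice-concatenation splice of the five part directives plus blank line.
import Mathlib
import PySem

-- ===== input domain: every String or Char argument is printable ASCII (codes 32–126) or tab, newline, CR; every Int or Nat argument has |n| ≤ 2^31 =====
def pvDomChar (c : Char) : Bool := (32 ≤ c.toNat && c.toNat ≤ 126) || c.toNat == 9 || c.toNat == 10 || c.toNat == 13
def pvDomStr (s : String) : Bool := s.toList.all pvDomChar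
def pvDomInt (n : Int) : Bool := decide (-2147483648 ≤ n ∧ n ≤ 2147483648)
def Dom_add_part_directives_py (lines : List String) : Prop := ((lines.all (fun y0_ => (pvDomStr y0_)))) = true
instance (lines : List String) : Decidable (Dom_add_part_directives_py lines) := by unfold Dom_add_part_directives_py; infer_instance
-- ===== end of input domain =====

-- B replaces A's flag-driven append loop by a first-index search plus a slice-concatenation splice (objective: simpler); return value only, no mutation.

-- ===== PORT A =====
def pvPartLines : List String := [
  "part 'modern_reports_dashboard_operations.dart';",
  "part 'modern_reports_dashboard_futures.dart';",
  "part 'modern_reports_dashboard_helpers.dart';",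
  "part 'modern_reports_dashboard_medium_widgets.dart';",
  "part 'modern_reports_dashboard_small_widgets.dart';"]

-- A's loop body: state = (output, inserted)
def pvStepA (st : List String × Bool) (line : String) : List String × Bool :=
  if !st.2 && PySem.Str.startswith line "enum TimeRange" then
    (st.1 ++ pvPartLines ++ [""] ++ [line], true)
  else
    (st.1 ++ [line], st.2)

def add_part_directives_py (lines : List String) : List String :=
  if lines.any (fun line => PySem.Str.isIn "part 'modern_reports_dashboard" line) then
    lines
  else
    (lines.foldl pvStepA ([], false)).1

-- ===== PORT B =====
def add_part_directives_py_alt (lines : List String) : List String :=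
  if lines.any (fun line => PySem.Str.isIn "part 'modern_reports_dashboard" line) then
    lines
  else
    match lines.findIdx? (fun l => PySem.Str.startswith l "enum TimeRange") with
    | none => lines
    | some i => lines.take i ++ pvPartLines ++ [""] ++ lines.drop i

-- ===== PRECONDITION & SPEC =====
def Spec_add_part_directives_py (lines : List String) (out : List String) : Prop := out = add_part_directives_py_alt lines
instance (lines : List String) (out : List String) : Decidable (Spec_add_part_directives_py lines out) := by unfold Spec_add_part_directives_py; infer_instance

-- ===== CLAIM (what is proved, stated in full; the proofs are below) =====
def Claim_equal_add_part_directives_py : Prop := ∀ (lines : List String), Dom_add_part_directives_py lines → Spec_add_part_directives_py lines (add_part_directives_py lines)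

-- ===== LEMMAS AND PROOFS =====

-- once inserted = true, the loop just appends every remaining line
lemma foldA_true (lines : List String) (acc : List String) :
    (lines.foldl pvStepA (acc, true)).1 = acc ++ lines := by
  induction lines generalizing acc with
  | nil => simp
  | cons a l ih => simp [pvStepA, ih]

-- invariant of A's loop while inserted = false, phrased via B's index search
lemma foldA_false (lines : List String) (acc : List String) :
    (lines.foldl pvStepA (acc, false)).1 =
      match lines.findIdx? (fun l => PySem.Str.startswith l "enum TimeRange") with
      | none => acc ++ lines
      | some i => acc ++ (lines.take i ++ pvPartLines ++ [""] ++ lines.drop i) := by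
  induction lines generalizing acc with
  | nil => simp
  | cons a l ih =>
    by_cases h : PySem.Str.startswith a "enum TimeRange" = true
    · rw [List.foldl_cons,
        show pvStepA (acc, false) a = (acc ++ pvPartLines ++ [""] ++ [a], true) from by
          unfold pvStepA; split <;> simp_all,
        foldA_true, List.findIdx?_cons, if_pos h]
      simp
    · rw [List.foldl_cons,
        show pvStepA (acc, false) a = (acc ++ [a], false) from by
          unfold pvStepA; split <;> simp_all,
        ih, List.findIdx?_cons, if_neg h]
      cases hf : l.findIdx? (fun l => PySem.Str.startswith l "enum TimeRange") with
      | none => simp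
      | some i => simp

-- ===== VERDICT (by name: the statement is the Claim_ definition above) =====
theorem add_part_directives_py_spec : Claim_equal_add_part_directives_py := by
  intro lines _
  unfold Spec_add_part_directives_py add_part_directives_py add_part_directives_py_alt
  split
  · rfl
  · rw [foldA_false]
    cases lines.findIdx? (fun l => PySem.Str.startswith l "enum TimeRange") <;> simp
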